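-- pv_equiv track=rewrite | github.com/jannylund/advent-of-code-18 | day10.py | is_alone
-- ===== SOURCE A (Python) =====
-- def is_alone(coord, other):
--     x, y = coord
--
--     neighbours = set([(x + 1, y),
--                       (x - 1, y),
--                       (x, y - 1),
--                       (x, y + 1),
--                       (x + 1, y + 1),
--                       (x + 1, y - 1),
--                       (x - 1, y + 1),
--                       (x - 1, y - 1)])
--
--     for n in neighbours:
--         if n in other:
--             return False
--
--     return True
-- ===== SOURCE B (Python) =====
-- def is_alone(coord, other):
--     x, y = coord
--     for ox, oy in other:
--         if max(abs(ox - x), abs(oy - y)) == 1: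
--             return False
--     return True
-- ===== Notes on version B (the rewrite author's own statement) =====
-- stated objective: simpler
-- what changed: B drops the precomputed 8-neighbour set and membership probes, and instead does one pass over `other`, testing adjacency arithmetically as Chebyshev distance == 1.
import Mathlib
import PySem

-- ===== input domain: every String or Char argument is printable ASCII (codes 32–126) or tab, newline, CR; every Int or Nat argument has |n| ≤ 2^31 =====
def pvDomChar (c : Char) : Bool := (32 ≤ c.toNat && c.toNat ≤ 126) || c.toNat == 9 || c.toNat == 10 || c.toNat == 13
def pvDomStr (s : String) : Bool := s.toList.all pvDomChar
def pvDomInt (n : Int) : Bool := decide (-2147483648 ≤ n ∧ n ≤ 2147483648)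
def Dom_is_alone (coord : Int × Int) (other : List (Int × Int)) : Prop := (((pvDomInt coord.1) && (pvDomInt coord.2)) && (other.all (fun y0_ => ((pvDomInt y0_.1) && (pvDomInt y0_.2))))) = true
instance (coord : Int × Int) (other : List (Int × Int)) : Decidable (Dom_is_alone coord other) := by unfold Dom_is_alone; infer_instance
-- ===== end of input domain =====

-- B replaces A's 8-neighbour set and membership probes with a single scan of `other`
-- testing Chebyshev distance == 1 arithmetically (objective: simpler).

-- ===== PORT A =====
def is_alone (coord : Int × Int) (other : List (Int × Int)) : Bool :=
  let x := coord.1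
  let y := coord.2
  let neighbours : PySem.Set (Int × Int) :=
    PySem.Set.ofList [(x + 1, y), (x - 1, y), (x, y - 1), (x, y + 1),
                      (x + 1, y + 1), (x + 1, y - 1), (x - 1, y + 1), (x - 1, y - 1)]
  -- 'for n in neighbours: if n in other: return False' — order-independent early exit = any
  !(neighbours.any (fun n => other.contains n))

-- ===== PORT B =====
def is_alone_alt (coord : Int × Int) (other : List (Int × Int)) : Bool :=
  !(other.any (fun o => max (o.1 - coord.1).natAbs (o.2 - coord.2).natAbs == 1))

-- ===== PRECONDITION & SPEC =====
def Spec_is_alone (coord : Int × Int) (other : List (Int × Int)) (out : Bool) : Prop := out = is_alone_alt coord other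
instance (coord : Int × Int) (other : List (Int × Int)) (out : Bool) : Decidable (Spec_is_alone coord other out) := by unfold Spec_is_alone; infer_instance

-- ===== CLAIM (what is proved, stated in full; the proofs are below) =====
def Claim_equal_is_alone : Prop := ∀ (coord : Int × Int) (other : List (Int × Int)), Dom_is_alone coord other → Spec_is_alone coord other (is_alone coord other)

-- ===== LEMMAS AND PROOFS =====

-- A point is one of the 8 neighbours of (x, y) exactly when its Chebyshev distance to (x, y) is 1.
lemma mem_neighbours_iff (x y ox oy : Int) :
    ((ox, oy) ∈ [((x + 1 : Int), y), (x - 1, y), (x, y - 1), (x, y + 1),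
                 (x + 1, y + 1), (x + 1, y - 1), (x - 1, y + 1), (x - 1, y - 1)])
      ↔ max (ox - x).natAbs (oy - y).natAbs = 1 := by
  simp only [List.mem_cons, List.not_mem_nil, or_false, Prod.mk.injEq]
  omega

-- ===== VERDICT (by name: the statement is the Claim_ definition above) =====
theorem is_alone_spec : Claim_equal_is_alone := by
  intro coord other _
  unfold Spec_is_alone is_alone is_alone_alt
  show (!(PySem.Set.ofList [(coord.1 + 1, coord.2), (coord.1 - 1, coord.2), (coord.1, coord.2 - 1),
          (coord.1, coord.2 + 1), (coord.1 + 1, coord.2 + 1), (coord.1 + 1, coord.2 - 1),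
          (coord.1 - 1, coord.2 + 1), (coord.1 - 1, coord.2 - 1)]).any (fun n => other.contains n)) =
      (!other.any fun o => max (o.1 - coord.1).natAbs (o.2 - coord.2).natAbs == 1)
  refine congrArg (fun b => !b) ?_
  rw [Bool.eq_iff_iff, List.any_eq_true, List.any_eq_true]
  constructor
  · rintro ⟨⟨nx, ny⟩, hn, hc⟩
    rw [PySem.Set.mem_ofList] at hn
    refine ⟨(nx, ny), by simpa using hc, ?_⟩
    simpa using (mem_neighbours_iff coord.1 coord.2 nx ny).mp hn
  · rintro ⟨⟨ox, oy⟩, ho, hd⟩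
    refine ⟨(ox, oy), ?_, by simpa using ho⟩
    rw [PySem.Set.mem_ofList]
    exact (mem_neighbours_iff coord.1 coord.2 ox oy).mpr (by simpa using hd)
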